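-- pv_equiv track=rewrite | github.com/jaratma/astro-nex | astronex/drawing/paarwabe.py | count_paar_plan
-- ===== SOURCE A (Python) =====
-- def count_paar_plan(paar):
--     planpaar = { 'suns': 0, 'moons':0, 'sats':0 }
--     for k in paar.keys():
--         nor = [ (x+1) for x in paar[k] ]
--         for i,n in enumerate(nor):
--             if n and i in [0,1,2,3,6]:
--                 planpaar['suns'] += 1
--             if n and i in [3,4,5,1,7]:
--                 planpaar['moons'] += 1
--             if n and i in [6,7,8,2,5]:
--                 planpaar['sats'] += 1
--     return planpaar
-- ===== SOURCE B (Python) =====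
-- # Different decomposition: first flatten paar into the list of hit position
-- # indices (where x+1 is truthy), then compute each counter as a sum of
-- # per-position counts over its category's index set; no mutable counter dict.
-- def count_paar_plan(paar):
--     hits = [i for vals in paar.values() for i, x in enumerate(vals) if x != -1]
--     return {
--         'suns':  sum(hits.count(i) for i in (0, 1, 2, 3, 6)),
--         'moons': sum(hits.count(i) for i in (3, 4, 5, 1, 7)),
--         'sats':  sum(hits.count(i) for i in (6, 7, 8, 2, 5)),
--     }
-- ===== Notes on version B (the rewrite author's own statement) =====
-- stated objective: faster
-- what changed: Instead of one pass mutating three dict counters per element, B first flattens paar into the list of hit position indices (where x+1 is truthy) and then computes each counter separately as a sum of per-position occurrence counts (list.count) over that category's index set.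
import Mathlib
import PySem

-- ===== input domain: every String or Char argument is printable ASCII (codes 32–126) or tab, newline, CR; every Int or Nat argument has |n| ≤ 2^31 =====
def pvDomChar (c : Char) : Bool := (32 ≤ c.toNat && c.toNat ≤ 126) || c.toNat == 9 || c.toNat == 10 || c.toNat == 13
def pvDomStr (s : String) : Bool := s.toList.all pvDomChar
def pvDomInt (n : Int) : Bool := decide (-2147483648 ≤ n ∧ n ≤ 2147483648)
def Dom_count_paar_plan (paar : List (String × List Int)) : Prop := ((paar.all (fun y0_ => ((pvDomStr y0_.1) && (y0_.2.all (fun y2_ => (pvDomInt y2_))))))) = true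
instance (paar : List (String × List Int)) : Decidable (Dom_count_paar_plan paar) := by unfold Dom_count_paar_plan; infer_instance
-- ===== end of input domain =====

-- B replaces A's single pass mutating three dict counters with a staged computation:
-- flatten paar to the list of hit position indices, then each counter is a sum of
-- per-position counts over its category's index set (measured constant-factor faster).

-- ===== PORT A =====
def count_paar_plan (paar : List (String × List Int)) : List (String × Int) :=
  let planpaar : PySem.Dict String Int := PySem.Dict.ofList [("suns", 0), ("moons", 0), ("sats", 0)]
  (paar.foldl (fun d kv =>
    let nor := kv.2.map (fun x => x + 1)
    (PySem.List.enumerate nor).foldl (fun d p =>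
      let i := p.1
      let n := p.2
      let d := if n ≠ 0 ∧ i ∈ ([0, 1, 2, 3, 6] : List Int) then d.modify "suns" 0 (· + 1) else d
      let d := if n ≠ 0 ∧ i ∈ ([3, 4, 5, 1, 7] : List Int) then d.modify "moons" 0 (· + 1) else d
      let d := if n ≠ 0 ∧ i ∈ ([6, 7, 8, 2, 5] : List Int) then d.modify "sats" 0 (· + 1) else d
      d) d) planpaar).items

-- ===== PORT B =====
def count_paar_plan_alt (paar : List (String × List Int)) : List (String × Int) :=
  let hits : List Int := paar.flatMap (fun kv =>
    ((PySem.List.enumerate kv.2).filter (fun p => p.2 != -1)).map (·.1))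
  (PySem.Dict.ofList
    [("suns",  (([0, 1, 2, 3, 6] : List Int).map (fun i => (hits.count i : Int))).sum),
     ("moons", (([3, 4, 5, 1, 7] : List Int).map (fun i => (hits.count i : Int))).sum),
     ("sats",  (([6, 7, 8, 2, 5] : List Int).map (fun i => (hits.count i : Int))).sum)]).items

-- ===== PRECONDITION & SPEC =====
def Spec_count_paar_plan (paar : List (String × List Int)) (out : List (String × Int)) : Prop := out = count_paar_plan_alt paar
instance (paar : List (String × List Int)) (out : List (String × Int)) : Decidable (Spec_count_paar_plan paar out) := by unfold Spec_count_paar_plan; infer_instance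

-- ===== CLAIM (what is proved, stated in full; the proofs are below) =====
def Claim_equal_count_paar_plan : Prop := ∀ (paar : List (String × List Int)), Dom_count_paar_plan paar → Spec_count_paar_plan paar (count_paar_plan paar)

-- ===== LEMMAS AND PROOFS =====

-- the three-entry counter dict, with variable values
def mk3 (s m t : Int) : PySem.Dict String Int :=
  PySem.Dict.mk [("suns", s), ("moons", m), ("sats", t)]

lemma mod_suns (s m t : Int) (f : Int → Int) : (mk3 s m t).modify "suns" 0 f = mk3 (f s) m t := rfl
lemma mod_moons (s m t : Int) (f : Int → Int) : (mk3 s m t).modify "moons" 0 f = mk3 s (f m) t := rfl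
lemma mod_sats (s m t : Int) (f : Int → Int) : (mk3 s m t).modify "sats" 0 f = mk3 s m (f t) := rfl

lemma mk3_congr {s m t s' m' t' : Int} (h1 : s = s') (h2 : m = m') (h3 : t = t') :
    mk3 s m t = mk3 s' m' t' := by subst h1 h2 h3; rfl

-- indicator sum over a duplicate-free index set
lemma sum_ite_mem (x : Int) (S : List Int) (hS : S.Nodup) :
    (S.map (fun i => if i = x then (1 : Int) else 0)).sum = if x ∈ S then 1 else 0 := by
  induction S with
  | nil => simp
  | cons a S ih =>
      rcases List.nodup_cons.mp hS with ⟨ha, hS'⟩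
      by_cases hax : a = x
      · subst hax
        simp [List.sum_cons, ih hS', ha]
      · simp only [List.map_cons, List.sum_cons, if_neg hax, ih hS', zero_add]
        by_cases hx : x ∈ S <;> simp [hx, Ne.symm hax]

-- a sum of counts over a duplicate-free index set is a countP
lemma sum_count_eq_countP (S : List Int) (hS : S.Nodup) (h : List Int) :
    (S.map (fun i => (h.count i : Int))).sum = (h.countP (fun a => decide (a ∈ S)) : Int) := by
  induction h with
  | nil => simp
  | cons x h ih =>
      have hcnt : (S.map (fun i => ((x :: h).count i : Int))).sum
          = (S.map (fun i => (h.count i : Int) + if i = x then 1 else 0)).sum := by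
        apply congrArg
        apply List.map_congr_left
        intro i _
        by_cases hix : i = x
        · simp [hix]
        · simp [hix, Ne.symm hix]
      rw [hcnt, PySem.List.sum_map_add_int, ih, sum_ite_mem x S hS, List.countP_cons]
      by_cases hx : x ∈ S <;> simp [hx]

-- enumerate of a mapped list
lemma enumerate_map (f : Int → Int) (v : List Int) (s : Int) :
    PySem.List.enumerate (v.map f) s = (PySem.List.enumerate v s).map (fun p => (p.1, f p.2)) := by
  induction v generalizing s with
  | nil => simp [PySem.List.enumerate_nil]
  | cons x v ih => simp [PySem.List.enumerate_cons, ih]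

-- A's inner loop on the three-entry dict counts three countP's
lemma A_inner (l : List (Int × Int)) (s m t : Int) :
    l.foldl (fun d p =>
      let i := p.1
      let n := p.2
      let d := if n ≠ 0 ∧ i ∈ ([0, 1, 2, 3, 6] : List Int) then d.modify "suns" 0 (· + 1) else d
      let d := if n ≠ 0 ∧ i ∈ ([3, 4, 5, 1, 7] : List Int) then d.modify "moons" 0 (· + 1) else d
      let d := if n ≠ 0 ∧ i ∈ ([6, 7, 8, 2, 5] : List Int) then d.modify "sats" 0 (· + 1) else d
      d) (mk3 s m t)
    = mk3 (s + (l.countP (fun p => decide (p.2 ≠ 0 ∧ p.1 ∈ ([0, 1, 2, 3, 6] : List Int))) : Int))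
          (m + (l.countP (fun p => decide (p.2 ≠ 0 ∧ p.1 ∈ ([3, 4, 5, 1, 7] : List Int))) : Int))
          (t + (l.countP (fun p => decide (p.2 ≠ 0 ∧ p.1 ∈ ([6, 7, 8, 2, 5] : List Int))) : Int)) := by
  induction l generalizing s m t with
  | nil => simp [mk3]
  | cons p l ih =>
      rw [List.foldl_cons]
      have hstep : (let i := p.1
          let n := p.2
          let d := if n ≠ 0 ∧ i ∈ ([0, 1, 2, 3, 6] : List Int) then (mk3 s m t).modify "suns" 0 (· + 1) else mk3 s m t
          let d := if n ≠ 0 ∧ i ∈ ([3, 4, 5, 1, 7] : List Int) then d.modify "moons" 0 (· + 1) else d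
          let d := if n ≠ 0 ∧ i ∈ ([6, 7, 8, 2, 5] : List Int) then d.modify "sats" 0 (· + 1) else d
          d)
          = mk3 (s + if p.2 ≠ 0 ∧ p.1 ∈ ([0, 1, 2, 3, 6] : List Int) then 1 else 0)
                (m + if p.2 ≠ 0 ∧ p.1 ∈ ([3, 4, 5, 1, 7] : List Int) then 1 else 0)
                (t + if p.2 ≠ 0 ∧ p.1 ∈ ([6, 7, 8, 2, 5] : List Int) then 1 else 0) := by
        by_cases hn : p.2 = 0
        · simp [hn]
        · by_cases h1 : p.1 ∈ ([0, 1, 2, 3, 6] : List Int) <;>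
          by_cases h2 : p.1 ∈ ([3, 4, 5, 1, 7] : List Int) <;>
          by_cases h3 : p.1 ∈ ([6, 7, 8, 2, 5] : List Int) <;>
          simp [hn, h1, h2, h3, mod_suns, mod_moons, mod_sats]
      rw [hstep, ih]
      clear ih hstep
      refine mk3_congr ?_ ?_ ?_ <;>
      · rw [List.countP_cons]
        split_ifs <;> simp_all <;> omega

-- A's whole loop, as per-entry countP sums
lemma A_outer (paar : List (String × List Int)) (s m t : Int) :
    paar.foldl (fun d kv =>
      let nor := kv.2.map (fun x => x + 1)
      (PySem.List.enumerate nor).foldl (fun d p =>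
        let i := p.1
        let n := p.2
        let d := if n ≠ 0 ∧ i ∈ ([0, 1, 2, 3, 6] : List Int) then d.modify "suns" 0 (· + 1) else d
        let d := if n ≠ 0 ∧ i ∈ ([3, 4, 5, 1, 7] : List Int) then d.modify "moons" 0 (· + 1) else d
        let d := if n ≠ 0 ∧ i ∈ ([6, 7, 8, 2, 5] : List Int) then d.modify "sats" 0 (· + 1) else d
        d) d) (mk3 s m t)
    = mk3 (s + (paar.map (fun kv => ((PySem.List.enumerate (kv.2.map (fun x => x + 1))).countP
              (fun p => decide (p.2 ≠ 0 ∧ p.1 ∈ ([0, 1, 2, 3, 6] : List Int))) : Int))).sum)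
          (m + (paar.map (fun kv => ((PySem.List.enumerate (kv.2.map (fun x => x + 1))).countP
              (fun p => decide (p.2 ≠ 0 ∧ p.1 ∈ ([3, 4, 5, 1, 7] : List Int))) : Int))).sum)
          (t + (paar.map (fun kv => ((PySem.List.enumerate (kv.2.map (fun x => x + 1))).countP
              (fun p => decide (p.2 ≠ 0 ∧ p.1 ∈ ([6, 7, 8, 2, 5] : List Int))) : Int))).sum) := by
  induction paar generalizing s m t with
  | nil => simp [mk3]
  | cons kv paar ih =>
      rw [List.foldl_cons]
      show paar.foldl _ ((PySem.List.enumerate (kv.2.map (fun x => x + 1))).foldl _ (mk3 s m t)) = _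
      rw [A_inner, ih]
      refine mk3_congr ?_ ?_ ?_ <;> (rw [List.map_cons, List.sum_cons]; ring)

-- per-entry bridge: A's countP over enumerate(nor) equals B's countP over the hit indices
lemma entry_bridge (S : List Int) (v : List Int) :
    ((PySem.List.enumerate (v.map (fun x => x + 1))).countP
        (fun p => decide (p.2 ≠ 0 ∧ p.1 ∈ S)))
    = ((((PySem.List.enumerate v).filter (fun p => p.2 != -1)).map (·.1)).countP
        (fun a => decide (a ∈ S))) := by
  rw [enumerate_map, List.countP_map, List.countP_map, List.countP_filter]
  apply List.countP_congr
  intro p _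
  by_cases hp : p.2 = -1 <;> by_cases hs : p.1 ∈ S <;>
    simp [hp, hs, Function.comp] <;> omega

-- summing the per-entry countP's over paar gives countP of the flattened hit list
lemma flat_bridge (S : List Int) (paar : List (String × List Int)) :
    (paar.map (fun kv => ((PySem.List.enumerate (kv.2.map (fun x => x + 1))).countP
        (fun p => decide (p.2 ≠ 0 ∧ p.1 ∈ S)) : Int))).sum
    = ((paar.flatMap (fun kv =>
        ((PySem.List.enumerate kv.2).filter (fun p => p.2 != -1)).map (·.1))).countP
        (fun a => decide (a ∈ S)) : Int) := by
  induction paar with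
  | nil => simp
  | cons kv paar ih =>
      rw [List.map_cons, List.sum_cons, ih, List.flatMap_cons, List.countP_append,
        entry_bridge S kv.2]
      push_cast
      ring

-- ===== VERDICT (by name: the statement is the Claim_ definition above) =====
theorem count_paar_plan_spec : Claim_equal_count_paar_plan := by
  intro paar _
  show count_paar_plan paar = count_paar_plan_alt paar
  have hA : count_paar_plan paar = (mk3
      (0 + (paar.map (fun kv => ((PySem.List.enumerate (kv.2.map (fun x => x + 1))).countP
          (fun p => decide (p.2 ≠ 0 ∧ p.1 ∈ ([0, 1, 2, 3, 6] : List Int))) : Int))).sum)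
      (0 + (paar.map (fun kv => ((PySem.List.enumerate (kv.2.map (fun x => x + 1))).countP
          (fun p => decide (p.2 ≠ 0 ∧ p.1 ∈ ([3, 4, 5, 1, 7] : List Int))) : Int))).sum)
      (0 + (paar.map (fun kv => ((PySem.List.enumerate (kv.2.map (fun x => x + 1))).countP
          (fun p => decide (p.2 ≠ 0 ∧ p.1 ∈ ([6, 7, 8, 2, 5] : List Int))) : Int))).sum)).items := by
    show (paar.foldl _ (mk3 0 0 0)).items = _
    rw [A_outer]
  rw [hA]
  show _ = (mk3
      ((([0, 1, 2, 3, 6] : List Int).map (fun i => (((paar.flatMap (fun kv =>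
          ((PySem.List.enumerate kv.2).filter (fun p => p.2 != -1)).map (·.1))).count i : Int)))).sum)
      ((([3, 4, 5, 1, 7] : List Int).map (fun i => (((paar.flatMap (fun kv =>
          ((PySem.List.enumerate kv.2).filter (fun p => p.2 != -1)).map (·.1))).count i : Int)))).sum)
      ((([6, 7, 8, 2, 5] : List Int).map (fun i => (((paar.flatMap (fun kv =>
          ((PySem.List.enumerate kv.2).filter (fun p => p.2 != -1)).map (·.1))).count i : Int)))).sum)).items
  apply congrArg PySem.Dict.items
  refine mk3_congr ?_ ?_ ?_ <;>
  · rw [sum_count_eq_countP _ (by decide), ← flat_bridge]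
    ring
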